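-- pv_equiv track=rewrite | github.com/Grillcheese-AI/cubemind | cubemind/reasoning/rule_detectors.py | detect_arithmetic
-- ===== SOURCE A (Python) =====
-- def detect_arithmetic(grid) -> int | None:
--     """Arithmetic rule: linear combinations within rows."""
--     r0, r1 = grid[0], grid[1]
--     formulas = [
--         ("col2_is_sum", (1, 1, -1)),
--         ("col2_is_diff", (1, -1, -1)),
--         ("col2_is_rdiff", (-1, 1, -1)),
--         ("row_sum", (1, 1, 1)),
--         ("col0_is_sum", (-1, 1, 1)),
--         ("col1_is_sum", (1, -1, 1)),
--     ]
--     matches = []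
--     for name, (ca, cb, cc) in formulas:
--         s0 = ca * r0[0] + cb * r0[1] + cc * r0[2]
--         s1 = ca * r1[0] + cb * r1[1] + cc * r1[2]
--         if s0 == s1:
--             matches.append((name, s0, (ca, cb, cc)))
--     if not matches:
--         return None
--     a, b = grid[2][0], grid[2][1]
--     for name, S, (ca, cb, cc) in matches:
--         numerator = S - ca * a - cb * b
--         if cc == 0:
--             continue
--         if numerator % cc != 0:
--             continue
--         val = numerator // cc
--         if val >= 0:  # no upper bound — supports OOD attribute ranges
--             return val
--     return None
-- ===== SOURCE B (Python) =====
-- CANDIDATES = [(1, 1, -1), (1, -1, -1), (-1, 1, -1), (1, 1, 1), (-1, 1, 1), (1, -1, 1)]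
--
--
-- def detect_arithmetic(grid) -> int | None:
--     """Arithmetic rule via orthogonality: a coefficient vector c fits both top rows
--     iff c is orthogonal to row0 - row1; since every candidate has cc in {-1, 1},
--     the solved cell is cc * (c . row1 - ca*a - cb*b) with no division at all."""
--     r0, r1 = grid[0][:3], grid[1][:3]
--     diff = [x - y for x, y in zip(r0, r1)]
--
--     def dot(u, v):
--         return sum(x * y for x, y in zip(u, v))
--
--     def go(cands):
--         if not cands:
--             return None
--         c = cands[0]
--         if dot(c, diff) == 0:
--             val = c[2] * (dot(c, r1) - c[0] * grid[2][0] - c[1] * grid[2][1])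
--             if val >= 0:
--                 return val
--         return go(cands[1:])
--
--     return go(CANDIDATES)
-- ===== Notes on version B (the rewrite author's own statement) =====
-- stated objective: alternative
-- what changed: Replaces A's filter-then-solve pipeline (collect matching formulas into a list, then rescan it doing floor division with divisibility and zero-divisor guards) by a recursive first-fit scan that tests each coefficient vector for orthogonality to row0-row1 via dot products and computes the solved cell by a sign-flip multiplication (every cc is +-1, so cc*numerator = numerator//cc), eliminating the matches list, the names, the cc==0 guard, the modulo test and the division.
import Mathlib
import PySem

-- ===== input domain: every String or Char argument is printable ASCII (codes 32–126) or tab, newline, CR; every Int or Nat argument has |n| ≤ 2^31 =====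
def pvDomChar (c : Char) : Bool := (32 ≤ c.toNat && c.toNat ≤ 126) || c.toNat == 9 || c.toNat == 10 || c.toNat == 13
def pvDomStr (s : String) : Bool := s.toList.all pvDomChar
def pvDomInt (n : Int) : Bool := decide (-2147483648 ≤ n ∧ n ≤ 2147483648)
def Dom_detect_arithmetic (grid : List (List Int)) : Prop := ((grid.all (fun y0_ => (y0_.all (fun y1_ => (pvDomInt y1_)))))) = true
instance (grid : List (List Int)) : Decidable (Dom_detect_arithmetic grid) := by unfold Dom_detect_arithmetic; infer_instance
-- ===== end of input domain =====

-- B replaces A's filter-then-solve pipeline (matches list, then floor division with guards) by a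
-- recursive first-fit scan testing each coefficient vector for orthogonality to row0 - row1 and
-- solving by sign-flip multiplication (every cc is ±1); same return value everywhere A returns.

-- xs[i] for an in-range nonnegative index (Pre_ guarantees the accesses that matter are in range)
def pvGetI (xs : List Int) (i : Int) : Int := (PySem.List.pyGet? xs i).getD 0

def pvGetL (xss : List (List Int)) (i : Int) : List Int := (PySem.List.pyGet? xss i).getD []

-- ===== PORT A =====
def pvFormulas : List (String × (Int × Int × Int)) :=
  [("col2_is_sum", (1, 1, -1)), ("col2_is_diff", (1, -1, -1)), ("col2_is_rdiff", (-1, 1, -1)),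
   ("row_sum", (1, 1, 1)), ("col0_is_sum", (-1, 1, 1)), ("col1_is_sum", (1, -1, 1))]

-- the body of A's first 'for' loop (collecting into matches)
def pvCollect (r0 r1 : List Int) (acc : List (String × Int × (Int × Int × Int)))
    (f : String × (Int × Int × Int)) : List (String × Int × (Int × Int × Int)) :=
  match f with
  | (name, (ca, cb, cc)) =>
    let s0 := ca * pvGetI r0 0 + cb * pvGetI r0 1 + cc * pvGetI r0 2
    let s1 := ca * pvGetI r1 0 + cb * pvGetI r1 1 + cc * pvGetI r1 2
    if s0 = s1 then acc ++ [(name, s0, (ca, cb, cc))] else acc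

-- the second 'for' loop of A, with its early return
def pvALoop (a b : Int) : List (String × Int × (Int × Int × Int)) → Option Int
  | [] => none
  | (_, S, (ca, cb, cc)) :: rest =>
      let numerator := S - ca * a - cb * b
      if cc = 0 then pvALoop a b rest
      else if PySem.Int.mod numerator cc ≠ 0 then pvALoop a b rest
      else
        let val := PySem.Int.floordiv numerator cc
        if val ≥ 0 then some val else pvALoop a b rest

def detect_arithmetic (grid : List (List Int)) : Option Int :=
  let r0 := pvGetL grid 0
  let r1 := pvGetL grid 1
  let matchesL := pvFormulas.foldl (pvCollect r0 r1) []
  if matchesL.isEmpty then none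
  else
    let a := pvGetI (pvGetL grid 2) 0
    let b := pvGetI (pvGetL grid 2) 1
    pvALoop a b matchesL

-- ===== PORT B =====
def pvCands : List (Int × Int × Int) :=
  [(1, 1, -1), (1, -1, -1), (-1, 1, -1), (1, 1, 1), (-1, 1, 1), (1, -1, 1)]

-- sum(x * y for x, y in zip(u, v)) with a coefficient triple as u
def pvDot (c : Int × Int × Int) (v : List Int) : Int :=
  (([c.1, c.2.1, c.2.2].zip v).map (fun p => p.1 * p.2)).foldl (· + ·) 0

-- the recursive helper 'go'
def pvGo (diff r1 : List Int) (grid : List (List Int)) : List (Int × Int × Int) → Option Int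
  | [] => none
  | c :: rest =>
    if pvDot c diff = 0 then
      let val := c.2.2 * (pvDot c r1 - c.1 * pvGetI (pvGetL grid 2) 0 - c.2.1 * pvGetI (pvGetL grid 2) 1)
      if val ≥ 0 then some val else pvGo diff r1 grid rest
    else pvGo diff r1 grid rest

def detect_arithmetic_alt (grid : List (List Int)) : Option Int :=
  let r0 := PySem.List.slice (pvGetL grid 0) none (some 3)
  let r1 := PySem.List.slice (pvGetL grid 1) none (some 3)
  let diff := (r0.zip r1).map (fun p => p.1 - p.2)
  pvGo diff r1 grid pvCands

-- ===== PRECONDITION & SPEC =====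
-- exactly the inputs where Python A returns: rows 0 and 1 exist with ≥ 3 entries, and if any of
-- the six linear-combination equations matches between them (so grid[2] is read), row 2 exists
-- with ≥ 2 entries
def Pre_detect_arithmetic (grid : List (List Int)) : Prop :=
  2 ≤ grid.length ∧ 3 ≤ (grid.getD 0 []).length ∧ 3 ≤ (grid.getD 1 []).length ∧
  ((∃ c ∈ pvCands,
      c.1 * pvGetI (pvGetL grid 0) 0 + c.2.1 * pvGetI (pvGetL grid 0) 1 + c.2.2 * pvGetI (pvGetL grid 0) 2 =
      c.1 * pvGetI (pvGetL grid 1) 0 + c.2.1 * pvGetI (pvGetL grid 1) 1 + c.2.2 * pvGetI (pvGetL grid 1) 2) →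
    3 ≤ grid.length ∧ 2 ≤ (grid.getD 2 []).length)
instance (grid : List (List Int)) : Decidable (Pre_detect_arithmetic grid) := by
  unfold Pre_detect_arithmetic; infer_instance

def pvWitness_detect_arithmetic : List (List Int) := [[1, 2, 3], [4, 5, 9], [2, 6]]

def Spec_detect_arithmetic (grid : List (List Int)) (out : Option Int) : Prop := out = detect_arithmetic_alt grid
instance (grid : List (List Int)) (out : Option Int) : Decidable (Spec_detect_arithmetic grid out) := by unfold Spec_detect_arithmetic; infer_instance

-- ===== CLAIM (what is proved, stated in full; the proofs are below) =====
def Claim_equal_detect_arithmetic : Prop := ∀ (grid : List (List Int)), Dom_detect_arithmetic grid → Pre_detect_arithmetic grid → Spec_detect_arithmetic grid (detect_arithmetic grid)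

-- ===== LEMMAS AND PROOFS =====

lemma pvGetI0 (a : Int) (t : List Int) : pvGetI (a :: t) 0 = a := by
  simp [pvGetI, PySem.List.pyGet?, PySem.List.pyIdx?]

lemma pvGetI1 (a b : Int) (t : List Int) : pvGetI (a :: b :: t) 1 = b := by
  simp only [pvGetI, PySem.List.pyGet?, PySem.List.pyIdx?]
  norm_num

lemma pvGetI2 (a b c : Int) (t : List Int) : pvGetI (a :: b :: c :: t) 2 = c := by
  simp only [pvGetI, PySem.List.pyGet?, PySem.List.pyIdx?]
  norm_num
  rw [if_pos (by omega)]
  simp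

lemma pvGetL0 (a : List Int) (t : List (List Int)) : pvGetL (a :: t) 0 = a := by
  simp [pvGetL, PySem.List.pyGet?, PySem.List.pyIdx?]

lemma pvGetL1 (a b : List Int) (t : List (List Int)) : pvGetL (a :: b :: t) 1 = b := by
  simp only [pvGetL, PySem.List.pyGet?, PySem.List.pyIdx?]
  norm_num

lemma pv_mod_pm1 (n cc : Int) (h : cc = 1 ∨ cc = -1) : PySem.Int.mod n cc = 0 := by
  rcases h with rfl | rfl
  · exact (PySem.Int.mod_eq_zero_iff_dvd n 1).mpr (one_dvd n)
  · exact (PySem.Int.mod_eq_zero_iff_dvd n (-1)).mpr ⟨-n, by ring⟩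

lemma pv_fdiv_pm1 (n cc : Int) (h : cc = 1 ∨ cc = -1) : PySem.Int.floordiv n cc = cc * n := by
  have hm := pv_mod_pm1 n cc h
  have hd := PySem.Int.floordiv_mul_add_mod n cc
  rcases h with rfl | rfl <;> omega

lemma pvALoop_nil (a b : Int) : pvALoop a b [] = none := rfl

lemma pvALoop_append (a b : Int) (xs ys : List (String × Int × (Int × Int × Int))) :
    pvALoop a b (xs ++ ys) =
      (match pvALoop a b xs with
       | some v => some v
       | none => pvALoop a b ys) := by
  induction xs with
  | nil => simp [pvALoop]
  | cons x xs ih =>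
    obtain ⟨n, S, ca, cb, cc⟩ := x
    simp only [List.cons_append, pvALoop]
    split_ifs <;> simp [ih]

-- one matching formula in A's second loop yields B's sign-flip value, since cc = ±1
lemma pvALoop_single (x y S ca cb cc : Int) (n : String) (h : cc = 1 ∨ cc = -1) :
    pvALoop x y [(n, S, (ca, cb, cc))] =
      (if cc * (S - ca * x - cb * y) ≥ 0 then some (cc * (S - ca * x - cb * y)) else none) := by
  have hc : cc ≠ 0 := by rcases h with rfl | rfl <;> norm_num
  simp [pvALoop, hc, pv_mod_pm1 _ _ h, pv_fdiv_pm1 _ _ h]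

-- the single collection step of A's first loop, on destructured rows
lemma pvCollect_eq (a0 a1 a2 b0 b1 b2 : Int) (t0 t1 : List Int)
    (acc : List (String × Int × (Int × Int × Int))) (name : String) (ca cb cc : Int) :
    pvCollect (a0 :: a1 :: a2 :: t0) (b0 :: b1 :: b2 :: t1) acc (name, (ca, cb, cc)) =
      (if ca * a0 + cb * a1 + cc * a2 = ca * b0 + cb * b1 + cc * b2
       then acc ++ [(name, ca * a0 + cb * a1 + cc * a2, (ca, cb, cc))] else acc) := by
  simp only [pvCollect, pvGetI0, pvGetI1, pvGetI2]

-- B's fused scan equals A's filter-then-scan, for any prefix of collected matches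
lemma pv_fused (grid : List (List Int)) (a0 a1 a2 b0 b1 b2 : Int) (t0 t1 : List Int) :
    ∀ (fs : List (String × (Int × Int × Int))) (acc : List (String × Int × (Int × Int × Int))),
      (∀ f ∈ fs, f.2.2.2 = 1 ∨ f.2.2.2 = -1) →
      pvALoop (pvGetI (pvGetL grid 2) 0) (pvGetI (pvGetL grid 2) 1)
        (fs.foldl (pvCollect (a0 :: a1 :: a2 :: t0) (b0 :: b1 :: b2 :: t1)) acc) =
      (match pvALoop (pvGetI (pvGetL grid 2) 0) (pvGetI (pvGetL grid 2) 1) acc with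
       | some v => some v
       | none => pvGo [a0 - b0, a1 - b1, a2 - b2] [b0, b1, b2] grid (fs.map Prod.snd)) := by
  intro fs
  induction fs with
  | nil =>
    intro acc _
    cases h : pvALoop (pvGetI (pvGetL grid 2) 0) (pvGetI (pvGetL grid 2) 1) acc <;>
      simp [List.foldl, pvGo, h]
  | cons f fs ih =>
    intro acc hcc
    obtain ⟨name, ca, cb, cc⟩ := f
    have hcc1 : cc = 1 ∨ cc = -1 := hcc _ (List.mem_cons_self ..)
    have hccr : ∀ f ∈ fs, f.2.2.2 = 1 ∨ f.2.2.2 = -1 := fun f hf => hcc f (List.mem_cons_of_mem _ hf)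
    have hdot : pvDot (ca, cb, cc) [a0 - b0, a1 - b1, a2 - b2] =
        (ca * a0 + cb * a1 + cc * a2) - (ca * b0 + cb * b1 + cc * b2) := by
      simp [pvDot]; try ring
    have hdotr1 : pvDot (ca, cb, cc) [b0, b1, b2] = ca * b0 + cb * b1 + cc * b2 := by
      simp [pvDot]; try ring
    rw [List.foldl_cons, List.map_cons, pvCollect_eq]
    by_cases hs : ca * a0 + cb * a1 + cc * a2 = ca * b0 + cb * b1 + cc * b2
    · rw [if_pos hs, ih _ hccr, pvALoop_append]
      cases hacc : pvALoop (pvGetI (pvGetL grid 2) 0) (pvGetI (pvGetL grid 2) 1) acc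
      · simp only
        rw [pvALoop_single _ _ _ _ _ _ _ hcc1]
        simp only [pvGo, hdot, hdotr1, ← hs, sub_self]
        split_ifs <;> simp
      · simp
    · rw [if_neg hs, ih _ hccr]
      have hd0 : ¬ pvDot (ca, cb, cc) [a0 - b0, a1 - b1, a2 - b2] = 0 := by omega
      cases hacc : pvALoop (pvGetI (pvGetL grid 2) 0) (pvGetI (pvGetL grid 2) 1) acc <;>
        simp [pvGo, hd0]

lemma pvCands_eq : pvFormulas.map Prod.snd = pvCands := by decide

-- ===== VERDICT (by name: the statement is the Claim_ definition above) =====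
theorem detect_arithmetic_spec : Claim_equal_detect_arithmetic := by
  intro grid _ hpre
  obtain ⟨h2, h0, h1, _⟩ := hpre
  unfold Spec_detect_arithmetic
  match grid, h2 with
  | g0 :: g1 :: rest, _ =>
    simp only [List.getD, List.getElem?_cons_zero, List.getElem?_cons_succ, Option.getD_some] at h0 h1
    match g0, h0 with
    | a0 :: a1 :: a2 :: t0, _ =>
      match g1, h1 with
      | b0 :: b1 :: b2 :: t1, _ =>
        have hsl0 : PySem.List.slice (a0 :: a1 :: a2 :: t0) none (some 3) = [a0, a1, a2] := by
          rw [PySem.List.slice_to (hb := by norm_num)]; rfl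
        have hsl1 : PySem.List.slice (b0 :: b1 :: b2 :: t1) none (some 3) = [b0, b1, b2] := by
          rw [PySem.List.slice_to (hb := by norm_num)]; rfl
        unfold detect_arithmetic detect_arithmetic_alt
        simp only [pvGetL0, pvGetL1, hsl0, hsl1, List.zip_cons_cons, List.zip_nil_left,
          List.map_cons, List.map_nil]
        have h := pv_fused ((a0 :: a1 :: a2 :: t0) :: (b0 :: b1 :: b2 :: t1) :: rest)
          a0 a1 a2 b0 b1 b2 t0 t1 pvFormulas [] (by decide)
        simp only [pvALoop_nil, pvCands_eq] at h
        by_cases he : (pvFormulas.foldl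
            (pvCollect (a0 :: a1 :: a2 :: t0) (b0 :: b1 :: b2 :: t1)) []).isEmpty
        · rw [List.isEmpty_iff] at he
          rw [he] at h
          simp only [pvALoop_nil] at h
          simp [he, ← h]
        · simp only [he, Bool.false_eq_true, if_false]
          simpa using h
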